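-- pv_equiv track=rewrite | github.com/sigmapi-academy/Jiya_Learning_The_code | Coding/ListOperations/Q19PE.py | longestEmptySequence
-- ===== SOURCE A (Python) =====
-- def longestEmptySequence(stalls:list):
--     max_len = 0
--     longest_range = (0,0)
--     i = 0
--     while i < len(stalls):
--         if not stalls[i]:
--             start = i
--             while i < len(stalls) and not stalls[i]:
--                 i += 1
--             length = i - start
--             if length > max_len:
--                 max_len = length
--                 longest_range = (start, i - 1)
--         else:
--             i += 1
--
--     return longest_range if max_len > 0 else None
-- ===== SOURCE B (Python) =====
-- def longestEmptySequence(stalls: list):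
--     # Boundary method: collect the indices of occupied stalls, bracket them with
--     # sentinels -1 and len(stalls); each consecutive pair of boundaries encloses
--     # one (possibly empty) run of empty stalls. Pick the first strictly-longest gap.
--     bounds = [-1] + [i for i, s in enumerate(stalls) if s] + [len(stalls)]
--     best = None
--     best_len = 0
--     for a, b in zip(bounds, bounds[1:]):
--         gap = b - a - 1
--         if gap > best_len:
--             best_len = gap
--             best = (a + 1, b - 1)
--     return best
-- ===== Notes on version B (the rewrite author's own statement) =====
-- stated objective: alternative
-- what changed: Replaced A's nested index-advancing run scan by a boundary method: stage 1 collects the indices of occupied stalls bracketed by sentinels -1 and len(stalls); stage 2 scans consecutive boundary pairs and keeps the first strictly-largest gap.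
import Mathlib
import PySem

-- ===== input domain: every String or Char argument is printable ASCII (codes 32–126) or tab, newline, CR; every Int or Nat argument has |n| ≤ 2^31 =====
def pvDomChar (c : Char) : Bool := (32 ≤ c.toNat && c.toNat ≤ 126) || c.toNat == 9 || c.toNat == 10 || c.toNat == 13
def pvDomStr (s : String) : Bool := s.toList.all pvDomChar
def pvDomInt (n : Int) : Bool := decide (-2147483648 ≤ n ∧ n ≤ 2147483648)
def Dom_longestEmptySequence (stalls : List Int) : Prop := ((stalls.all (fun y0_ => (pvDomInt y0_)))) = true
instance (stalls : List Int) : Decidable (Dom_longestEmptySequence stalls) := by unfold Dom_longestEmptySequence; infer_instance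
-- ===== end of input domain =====

-- B replaces A's nested index-walking scan by a boundary method: collect occupied indices
-- bracketed by sentinels, then fold over consecutive boundary pairs (alternative; same cost).
-- (Fuel parameters below are only totality guards: each recursion gets enough fuel to finish.)

-- ===== PORT A =====
-- inner `while i < len(stalls) and not stalls[i]: i += 1` (fuel ≥ len(stalls) - i suffices)
def lesInnerF (stalls : List Int) : Nat → Nat → Nat
  | 0, i => i
  | f + 1, i =>
    if h : i < stalls.length then
      if stalls[i] = 0 then lesInnerF stalls f (i + 1) else i
    else i

-- outer `while i < len(stalls)` carrying (max_len, longest_range) (fuel > len(stalls) - i suffices)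
def lesOuterF (stalls : List Int) : Nat → Nat → Nat → (Int × Int) → Nat × (Int × Int)
  | 0, _, m, lr => (m, lr)
  | f + 1, i, m, lr =>
    if h : i < stalls.length then
      if stalls[i] = 0 then
        let j := lesInnerF stalls (stalls.length - i) i
        let len := j - i
        if len > m then lesOuterF stalls f j len ((i : Int), (j : Int) - 1)
        else lesOuterF stalls f j m lr
      else lesOuterF stalls f (i + 1) m lr
    else (m, lr)

def longestEmptySequence (stalls : List Int) : Option (Int × Int) :=
  let r := lesOuterF stalls (stalls.length + 1) 0 0 (0, 0)
  if r.1 > 0 then some r.2 else none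

-- ===== PORT B =====
-- the for-loop over zip(bounds, bounds[1:]), carrying (best_len, best)
def gapLoop : List (Int × Int) → Int → Option (Int × Int) → Option (Int × Int)
  | [], _, best => best
  | (a, b) :: rest, bestLen, best =>
      let gap := b - a - 1
      if gap > bestLen then gapLoop rest gap (some (a + 1, b - 1))
      else gapLoop rest bestLen best

-- bounds = [-1] + [i for i, s in enumerate(stalls) if s] + [len(stalls)]
def longestEmptySequence_alt (stalls : List Int) : Option (Int × Int) :=
  let bounds : List Int :=
    -1 :: ((PySem.List.enumerate stalls).filterMap
      (fun p => if p.2 ≠ 0 then some p.1 else none)) ++ [(stalls.length : Int)]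
  gapLoop (bounds.zip bounds.tail) 0 none

-- ===== PRECONDITION & SPEC =====
def Spec_longestEmptySequence (stalls : List Int) (out : Option (Int × Int)) : Prop := out = longestEmptySequence_alt stalls
instance (stalls : List Int) (out : Option (Int × Int)) : Decidable (Spec_longestEmptySequence stalls out) := by unfold Spec_longestEmptySequence; infer_instance

-- ===== CLAIM (what is proved, stated in full; the proofs are below) =====
def Claim_equal_longestEmptySequence : Prop := ∀ (stalls : List Int), Dom_longestEmptySequence stalls → Spec_longestEmptySequence stalls (longestEmptySequence stalls)

-- ===== LEMMAS AND PROOFS =====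

-- indices (as Int, starting from i) of the nonzero elements of a list
def occIdx : List Int → Int → List Int
  | [], _ => []
  | x :: xs, i => if x ≠ 0 then i :: occIdx xs (i + 1) else occIdx xs (i + 1)

-- the boundary pairs B folds over, for the A-scan suspended at index i
def pairsFrom (stalls : List Int) (i : Nat) : List (Int × Int) :=
  (((i : Int) - 1) :: occIdx (stalls.drop i) (i : Int) ++ [(stalls.length : Int)]).zip
    (occIdx (stalls.drop i) (i : Int) ++ [(stalls.length : Int)])

theorem filterMap_enumerate_occIdx :
    ∀ (xs : List Int) (s : Int),
    (PySem.List.enumerate xs s).filterMap (fun p => if p.2 ≠ 0 then some p.1 else none)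
      = occIdx xs s := by
  intro xs
  induction xs with
  | nil => intro s; simp [PySem.List.enumerate_nil, occIdx]
  | cons x xs ih =>
      intro s
      rw [PySem.List.enumerate_cons, List.filterMap_cons]
      have h := ih (s + 1)
      simp only [ne_eq, ite_not] at h
      by_cases hx : x = 0
      · simp [occIdx, hx, h]
      · simp [occIdx, hx, h]

theorem occIdx_zeros :
    ∀ (z r : List Int) (i : Int), (∀ x ∈ z, x = 0) →
    occIdx (z ++ r) i = occIdx r (i + z.length) := by
  intro z
  induction z with
  | nil => intro r i _; simp
  | cons x xs ih =>
      intro r i hz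
      have hx : x = 0 := hz x (by simp)
      rw [List.cons_append, occIdx, if_neg (by simp [hx]), ih r (i + 1) (fun y hy => hz y (by simp [hy]))]
      congr 1
      simp only [List.length_cons]
      push_cast
      ring

theorem dropWhile_head_ne :
    ∀ (l : List Int) (x : Int) (rest : List Int),
    l.dropWhile (fun y => y == 0) = x :: rest → ¬ x = 0 := by
  intro l
  induction l with
  | nil => intro x rest h; simp at h
  | cons a l ih =>
      intro x rest h
      rw [List.dropWhile_cons] at h
      by_cases ha : a = 0
      · rw [if_pos (by simp [ha])] at h
        exact ih x rest h
      · rw [if_neg (by simp [ha])] at h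
        cases h
        exact ha

-- with enough fuel, the inner loop lands just past the leading run of zeros
theorem lesInnerF_eq (stalls : List Int) :
    ∀ (f i : Nat), stalls.length ≤ f + i →
    lesInnerF stalls f i = i + ((stalls.drop i).takeWhile (fun y => y == 0)).length := by
  intro f
  induction f with
  | zero =>
      intro i hf
      rw [List.drop_eq_nil_of_le (by omega)]
      simp [lesInnerF]
  | succ f ih =>
      intro i hf
      simp only [lesInnerF]
      by_cases h : i < stalls.length
      · rw [dif_pos h]
        by_cases hz : stalls[i] = 0
        · rw [if_pos hz, ih (i + 1) (by omega)]
          rw [List.drop_eq_getElem_cons h]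
          simp [hz]
          omega
        · rw [if_neg hz, List.drop_eq_getElem_cons h]
          simp [hz]
      · rw [dif_neg h, List.drop_eq_nil_of_le (by omega)]
        simp

theorem lesInnerF_drop (stalls : List Int) :
    ∀ (f i : Nat), stalls.length ≤ f + i →
    stalls.drop (lesInnerF stalls f i) = (stalls.drop i).dropWhile (fun y => y == 0) := by
  intro f
  induction f with
  | zero =>
      intro i hf
      simp only [lesInnerF]
      rw [List.drop_eq_nil_of_le (by omega)]
      simp
  | succ f ih =>
      intro i hf
      simp only [lesInnerF]
      by_cases h : i < stalls.length
      · rw [dif_pos h]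
        by_cases hz : stalls[i] = 0
        · rw [if_pos hz, ih (i + 1) (by omega)]
          conv_rhs => rw [List.drop_eq_getElem_cons h]
          rw [List.dropWhile_cons, if_pos (by simp [hz])]
        · rw [if_neg hz]
          conv_rhs => rw [List.drop_eq_getElem_cons h]
          rw [List.dropWhile_cons, if_neg (by simp [hz])]
          exact List.drop_eq_getElem_cons h
      · rw [dif_neg h, List.drop_eq_nil_of_le (by omega)]
        simp

-- main invariant: the outer loop from i (with enough fuel) equals the gap fold over pairsFrom i
theorem main_inv (stalls : List Int) :
    ∀ (f i m : Nat) (lr : Int × Int), stalls.length < f + i →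
    (if (lesOuterF stalls f i m lr).1 > 0 then some (lesOuterF stalls f i m lr).2 else none)
      = gapLoop (pairsFrom stalls i) (m : Int) (if m > 0 then some lr else none) := by
  intro f
  induction f with
  | zero =>
      intro i m lr hf
      rw [lesOuterF]
      unfold pairsFrom
      rw [List.drop_eq_nil_of_le (by omega)]
      simp only [occIdx, List.cons_append, List.nil_append, List.zip_cons_cons, List.zip_nil_right, gapLoop]
      have hc : ¬((stalls.length : Int) - ((i : Int) - 1) - 1 > (m : Int)) := by omega
      rw [if_neg hc]
  | succ f ih =>
      intro i m lr hf
      simp only [lesOuterF]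
      by_cases h : i < stalls.length
      · rw [dif_pos h]
        by_cases hz : stalls[i] = 0
        · -- empty stall at i: the run ends at j; B's pair (i-1, j) records the same gap
          rw [if_pos hz]
          have hne := lesInnerF_eq stalls (stalls.length - i) i (by omega)
          have hdr := lesInnerF_drop stalls (stalls.length - i) i (by omega)
          set j := lesInnerF stalls (stalls.length - i) i with hjdef
          set t := ((stalls.drop i).takeWhile (fun y => y == 0)).length with htdef
          have ht1 : 1 ≤ t := by
            rw [htdef, List.drop_eq_getElem_cons h, List.takeWhile_cons, if_pos (by simp [hz])]
            simp
          have htle : t ≤ stalls.length - i := by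
            have := (List.takeWhile_sublist
              (p := fun y => (y == 0 : Bool)) (l := stalls.drop i)).length_le
            rw [List.length_drop] at this
            omega
          have hij : i < j := by omega
          have hjle : j ≤ stalls.length := by omega
          -- the boundary list shared by position i and position j
          set L : List Int := occIdx (stalls.drop j) (j : Int) ++ [(stalls.length : Int)] with hLdef
          have hocc : occIdx (stalls.drop i) (i : Int) = occIdx (stalls.drop j) (j : Int) := by
            conv_lhs => rw [← List.takeWhile_append_dropWhile
              (p := fun y => (y == 0 : Bool)) (l := stalls.drop i)]
            rw [occIdx_zeros _ _ _ (fun x hx => by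
              have := List.mem_takeWhile_imp hx
              simpa using this)]
            rw [← hdr, ← htdef]
            congr 1
            omega
          have hLhead : L = (j : Int) :: L.tail := by
            rw [hLdef]
            cases hdj : stalls.drop j with
            | nil =>
                have : stalls.length ≤ j := by
                  by_contra hlt
                  rw [List.drop_eq_nil_iff] at hdj
                  omega
                have hjlen : j = stalls.length := by omega
                simp [occIdx, hjlen]
            | cons x rest =>
                have hx : ¬ x = 0 := dropWhile_head_ne (stalls.drop i) x rest (by rw [← hdr, hdj])
                rw [occIdx, if_pos hx]
                simp
          have hzipL : ∀ a : Int, ((a :: L).zip L) = (a, (j : Int)) :: L.zip L.tail := by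
            intro a
            conv_lhs => rw [hLhead]
            rw [List.zip_cons_cons]
            congr 1
            · rw [← hLhead]
          have hpi : pairsFrom stalls i = (((i : Int) - 1), (j : Int)) :: L.zip L.tail := by
            unfold pairsFrom
            simp only [List.cons_append]
            rw [hocc, ← hLdef]
            exact hzipL _
          have hpj : pairsFrom stalls j = (((j : Int) - 1), (j : Int)) :: L.zip L.tail := by
            unfold pairsFrom
            simp only [List.cons_append]
            rw [← hLdef]
            exact hzipL _
          rw [hpi]
          simp only [gapLoop]
          by_cases hlen : j - i > m
          · rw [if_pos hlen, ih j (j - i) ((i : Int), (j : Int) - 1) (by omega)]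
            rw [hpj]
            simp only [gapLoop]
            have hc0 : ¬((j : Int) - ((j : Int) - 1) - 1 > ((j - i : Nat) : Int)) := by omega
            rw [if_neg hc0, if_pos (by omega : j - i > 0)]
            have hcg : ((j : Int) - ((i : Int) - 1) - 1 > (m : Int)) := by omega
            rw [if_pos hcg]
            have h1 : ((j - i : Nat) : Int) = (j : Int) - ((i : Int) - 1) - 1 := by omega
            have h2 : ((i : Int) - 1 + 1) = (i : Int) := by ring
            rw [h1, h2]
          · rw [if_neg hlen, ih j m lr (by omega)]
            rw [hpj]
            simp only [gapLoop]
            have hc0 : ¬((j : Int) - ((j : Int) - 1) - 1 > (m : Int)) := by omega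
            rw [if_neg hc0]
            have hcg : ¬((j : Int) - ((i : Int) - 1) - 1 > (m : Int)) := by omega
            rw [if_neg hcg]
        · -- occupied stall at i: B's pair (i-1, i) has gap 0 and is skipped
          rw [if_neg hz, ih (i + 1) m lr (by omega)]
          have hbs : pairsFrom stalls i
              = (((i : Int) - 1), (i : Int)) :: pairsFrom stalls (i + 1) := by
            unfold pairsFrom
            rw [List.drop_eq_getElem_cons h, occIdx, if_pos hz]
            simp only [List.cons_append, List.zip_cons_cons]
            congr 3 <;> (push_cast; ring)
          rw [hbs]
          simp only [gapLoop]
          have hc : ¬((i : Int) - ((i : Int) - 1) - 1 > (m : Int)) := by omega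
          rw [if_neg hc]
      · rw [dif_neg h]
        unfold pairsFrom
        rw [List.drop_eq_nil_of_le (by omega)]
        simp only [occIdx, List.cons_append, List.nil_append, List.zip_cons_cons, List.zip_nil_right, gapLoop]
        have hc : ¬((stalls.length : Int) - ((i : Int) - 1) - 1 > (m : Int)) := by omega
        rw [if_neg hc]

-- ===== VERDICT (by name: the statement is the Claim_ definition above) =====
theorem longestEmptySequence_spec : Claim_equal_longestEmptySequence := by
  intro stalls _
  unfold Spec_longestEmptySequence longestEmptySequence longestEmptySequence_alt
  rw [filterMap_enumerate_occIdx]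
  have := main_inv stalls (stalls.length + 1) 0 0 (0, 0) (by omega)
  simp only [Nat.cast_zero, if_neg (by omega : ¬ (0 : Nat) > 0)] at this
  rw [this]
  unfold pairsFrom
  norm_num
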